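-- pv_equiv track=rewrite | github.com/gorzerk1/Printer-ETL-Hub | Component/printerError/hp_ews_active_alerts.py | _flags_severity
-- ===== SOURCE A (Python) =====
-- from typing import Any, Dict, Optional, Tuple, List, Iterable
--
-- def _flags_severity(flags: List[str]) -> str:
--     critical = {"doorOpen","jammed","noPaper","noToner","markerSupplyMissing","outputFull","inputTrayEmpty","serviceRequested","offline"}
--     warning = {"lowPaper","lowToner","outputNearFull","overduePreventMaint","inputTrayMissing","outputTrayMissing"}
--     if any(f in critical for f in flags):
--         return "critical"
--     if any(f in warning for f in flags):
--         return "warning"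
--     return "informational"
-- ===== SOURCE B (Python) =====
-- def _flags_severity(flags):
--     rank = {
--         "doorOpen": 2, "jammed": 2, "noPaper": 2, "noToner": 2,
--         "markerSupplyMissing": 2, "outputFull": 2, "inputTrayEmpty": 2,
--         "serviceRequested": 2, "offline": 2,
--         "lowPaper": 1, "lowToner": 1, "outputNearFull": 1,
--         "overduePreventMaint": 1, "inputTrayMissing": 1, "outputTrayMissing": 1,
--     }
--     level = max((rank.get(f, 0) for f in flags), default=0)
--     return {2: "critical", 1: "warning"}.get(level, "informational")
-- ===== Notes on version B (the rewrite author's own statement) =====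
-- stated objective: simpler
-- what changed: Replaces the two separate any() membership scans over two sets and the if-cascade with a single max-reduction over a flag->rank dict, then a rank->label lookup.
import Mathlib
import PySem

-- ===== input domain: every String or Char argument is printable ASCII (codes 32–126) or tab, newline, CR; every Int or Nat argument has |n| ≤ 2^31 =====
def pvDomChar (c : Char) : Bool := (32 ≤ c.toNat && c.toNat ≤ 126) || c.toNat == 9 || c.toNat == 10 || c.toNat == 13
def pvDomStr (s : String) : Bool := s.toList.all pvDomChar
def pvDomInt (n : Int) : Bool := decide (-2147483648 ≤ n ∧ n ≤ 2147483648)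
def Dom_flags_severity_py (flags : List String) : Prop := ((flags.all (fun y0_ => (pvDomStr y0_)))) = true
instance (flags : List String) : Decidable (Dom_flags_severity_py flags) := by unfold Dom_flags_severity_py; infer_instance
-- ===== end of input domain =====

-- B replaces A's two any() membership scans over two sets and the if-cascade by a single
-- max-reduction over a flag→rank dict followed by a rank→label lookup (objective: simpler).

-- ===== PORT A =====
def pvCritical : PySem.Set String := PySem.Set.ofList
  ["doorOpen","jammed","noPaper","noToner","markerSupplyMissing","outputFull","inputTrayEmpty","serviceRequested","offline"]
def pvWarning : PySem.Set String := PySem.Set.ofList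
  ["lowPaper","lowToner","outputNearFull","overduePreventMaint","inputTrayMissing","outputTrayMissing"]

def flags_severity_py (flags : List String) : String :=
  if flags.any (fun f => PySem.Set.contains pvCritical f) then "critical"
  else if flags.any (fun f => PySem.Set.contains pvWarning f) then "warning"
  else "informational"

-- ===== PORT B =====
def pvRank : PySem.Dict String Int := PySem.Dict.ofList
  [("doorOpen",2),("jammed",2),("noPaper",2),("noToner",2),("markerSupplyMissing",2),
   ("outputFull",2),("inputTrayEmpty",2),("serviceRequested",2),("offline",2),
   ("lowPaper",1),("lowToner",1),("outputNearFull",1),("overduePreventMaint",1),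
   ("inputTrayMissing",1),("outputTrayMissing",1)]
def pvLabel : PySem.Dict Int String := PySem.Dict.ofList [(2,"critical"),(1,"warning")]

-- max(gen, default=0) is PySem.List.max? with .getD 0 (exact: empty iterable → the default)
def flags_severity_py_alt (flags : List String) : String :=
  let level : Int := (PySem.List.max? (flags.map (fun f => pvRank.getD f 0)) (fun x => x)).getD 0
  pvLabel.getD level "informational"

-- ===== PRECONDITION & SPEC =====
def Spec_flags_severity_py (flags : List String) (out : String) : Prop := out = flags_severity_py_alt flags
instance (flags : List String) (out : String) : Decidable (Spec_flags_severity_py flags out) := by unfold Spec_flags_severity_py; infer_instance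

-- ===== CLAIM (what is proved, stated in full; the proofs are below) =====
def Claim_equal_flags_severity_py : Prop := ∀ (flags : List String), Dom_flags_severity_py flags → Spec_flags_severity_py flags (flags_severity_py flags)

-- ===== LEMMAS AND PROOFS =====

-- B's rank of a single flag, characterised by A's two set memberships
lemma rank_eq (f : String) :
    pvRank.getD f 0 =
      if PySem.Set.contains pvCritical f then 2
      else if PySem.Set.contains pvWarning f then 1 else 0 := by
  have hr : pvRank = PySem.Dict.mk
    [("doorOpen",2),("jammed",2),("noPaper",2),("noToner",2),("markerSupplyMissing",2),
     ("outputFull",2),("inputTrayEmpty",2),("serviceRequested",2),("offline",2),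
     ("lowPaper",1),("lowToner",1),("outputNearFull",1),("overduePreventMaint",1),
     ("inputTrayMissing",1),("outputTrayMissing",1)] := by decide
  have hc : pvCritical = ["doorOpen","jammed","noPaper","noToner","markerSupplyMissing","outputFull","inputTrayEmpty","serviceRequested","offline"] := by decide
  have hw : pvWarning = ["lowPaper","lowToner","outputNearFull","overduePreventMaint","inputTrayMissing","outputTrayMissing"] := by decide
  rw [hr, hc, hw]
  simp only [PySem.Dict.getD_eq_get?_getD, PySem.Dict.get?_mk_cons, PySem.Set.contains,
    List.contains_cons, List.contains_nil]
  by_cases h1 : f = "doorOpen"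
  · subst h1; decide
  by_cases h2 : f = "jammed"
  · subst h2; decide
  by_cases h3 : f = "noPaper"
  · subst h3; decide
  by_cases h4 : f = "noToner"
  · subst h4; decide
  by_cases h5 : f = "markerSupplyMissing"
  · subst h5; decide
  by_cases h6 : f = "outputFull"
  · subst h6; decide
  by_cases h7 : f = "inputTrayEmpty"
  · subst h7; decide
  by_cases h8 : f = "serviceRequested"
  · subst h8; decide
  by_cases h9 : f = "offline"
  · subst h9; decide
  by_cases h10 : f = "lowPaper"
  · subst h10; decide
  by_cases h11 : f = "lowToner"
  · subst h11; decide
  by_cases h12 : f = "outputNearFull"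
  · subst h12; decide
  by_cases h13 : f = "overduePreventMaint"
  · subst h13; decide
  by_cases h14 : f = "inputTrayMissing"
  · subst h14; decide
  by_cases h15 : f = "outputTrayMissing"
  · subst h15; decide
  have g1 : ¬ ("doorOpen" = f) := fun e => h1 e.symm
  have g2 : ¬ ("jammed" = f) := fun e => h2 e.symm
  have g3 : ¬ ("noPaper" = f) := fun e => h3 e.symm
  have g4 : ¬ ("noToner" = f) := fun e => h4 e.symm
  have g5 : ¬ ("markerSupplyMissing" = f) := fun e => h5 e.symm
  have g6 : ¬ ("outputFull" = f) := fun e => h6 e.symm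
  have g7 : ¬ ("inputTrayEmpty" = f) := fun e => h7 e.symm
  have g8 : ¬ ("serviceRequested" = f) := fun e => h8 e.symm
  have g9 : ¬ ("offline" = f) := fun e => h9 e.symm
  have g10 : ¬ ("lowPaper" = f) := fun e => h10 e.symm
  have g11 : ¬ ("lowToner" = f) := fun e => h11 e.symm
  have g12 : ¬ ("outputNearFull" = f) := fun e => h12 e.symm
  have g13 : ¬ ("overduePreventMaint" = f) := fun e => h13 e.symm
  have g14 : ¬ ("inputTrayMissing" = f) := fun e => h14 e.symm
  have g15 : ¬ ("outputTrayMissing" = f) := fun e => h15 e.symm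
  simp [h1, h2, h3, h4, h5, h6, h7, h8, h9, h10, h11, h12, h13, h14, h15, g1, g2, g3, g4, g5, g6, g7, g8, g9, g10, g11, g12, g13, g14, g15, PySem.Dict.get?]

lemma rank_nonneg (f : String) : 0 ≤ pvRank.getD f 0 := by
  rw [rank_eq]; split_ifs <;> omega

-- B's reduction value (the Python 'level')
def pvLevel (l : List String) : Int :=
  (PySem.List.max? (l.map (fun f => pvRank.getD f 0)) (fun x => x)).getD 0

lemma foldl_max_eq (l : List String) : ∀ a : Int, 0 ≤ a →
    (l.map (fun f => pvRank.getD f 0)).foldl max a = max a (pvLevel l) := by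
  induction l with
  | nil => intro a ha; simp [pvLevel, PySem.List.max?]; omega
  | cons g t ih =>
    intro a ha
    have hg := rank_nonneg g
    simp only [pvLevel, List.map_cons, PySem.List.max?_id_cons, Option.getD_some, List.foldl_cons]
    rw [ih (max a (pvRank.getD g 0)) (le_trans ha (le_max_left _ _)),
        show (t.map (fun f => pvRank.getD f 0)).foldl max (pvRank.getD g 0)
           = max (pvRank.getD g 0) (pvLevel t) from by
          simpa [pvLevel] using ih (pvRank.getD g 0) hg, max_assoc]

lemma level_eq (l : List String) :
    pvLevel l =
      if l.any (fun f => PySem.Set.contains pvCritical f) then 2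
      else if l.any (fun f => PySem.Set.contains pvWarning f) then 1 else 0 := by
  induction l with
  | nil => simp [pvLevel, PySem.List.max?]
  | cons g t ih =>
    have h1 : pvLevel (g :: t) = max (pvRank.getD g 0) (pvLevel t) := by
      simp only [pvLevel, List.map_cons, PySem.List.max?_id_cons, Option.getD_some]
      simpa [pvLevel] using foldl_max_eq t (pvRank.getD g 0) (rank_nonneg g)
    rw [h1, ih, rank_eq g]
    simp only [List.any_cons]
    split_ifs <;> simp_all <;> tauto

-- ===== VERDICT (by name: the statement is the Claim_ definition above) =====
theorem flags_severity_py_spec : Claim_equal_flags_severity_py := by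
  intro flags _
  show flags_severity_py flags = flags_severity_py_alt flags
  unfold flags_severity_py flags_severity_py_alt
  rw [show (PySem.List.max? (flags.map (fun f => pvRank.getD f 0)) (fun x => x)).getD 0
      = pvLevel flags from rfl, level_eq]
  split_ifs <;> decide
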